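-- pv_equiv track=rewrite | github.com/vaibhavvachhani/CAB320-AI | mySokobanSolver.py | surrounded_by_walls
-- ===== SOURCE A (Python) =====
-- def surrounded_by_walls(walls, x_size, y_size, coord):
--
--     '''
--     Identifies the areas which is walkable from the intisial state of the worker.
--
--     '''
--
--     (x, y) = coord
--     left = right = top = bottom = False
--     #finding left
--     for x1 in range(x-1, -1, -1):
--         if (x1, y) in walls:
--             left = True
--             break
--     #finding right
--     for x1 in range(x+1, x_size):
--         if (x1, y) in walls:
--             right = True
--             break
--     #finding top
--     for y1 in range(y-1, -1, -1):
--         if (x, y1) in walls: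
--             top = True
--             break
--     #finding bottom
--     for y1 in range(y+1, y_size):
--         if (x, y1) in walls:
--             bottom = True
--             break
--     if left == False or right == False or top == False or bottom == False:
--         return False
--     else:
--         return True
-- ===== SOURCE B (Python) =====
-- def surrounded_by_walls(walls, x_size, y_size, coord):
--     '''
--     Identifies the areas which is walkable from the intisial state of the worker.
--     '''
--     (x, y) = coord
--     left = right = top = bottom = False
--     # one pass over the walls instead of scanning the four grid directions
--     for (wx, wy) in walls:
--         if wy == y and 0 <= wx <= x - 1:
--             left = True
--         if wy == y and x + 1 <= wx <= x_size - 1: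
--             right = True
--         if wx == x and 0 <= wy <= y - 1:
--             top = True
--         if wx == x and y + 1 <= wy <= y_size - 1:
--             bottom = True
--     return left and right and top and bottom
-- ===== Notes on version B (the rewrite author's own statement) =====
-- stated objective: faster
-- what changed: Replaces the four directional grid scans (ranges up to x_size/y_size long, each with a membership test over walls) by a single pass over the walls list that sets four direction flags from coordinate comparisons.
import Mathlib
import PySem

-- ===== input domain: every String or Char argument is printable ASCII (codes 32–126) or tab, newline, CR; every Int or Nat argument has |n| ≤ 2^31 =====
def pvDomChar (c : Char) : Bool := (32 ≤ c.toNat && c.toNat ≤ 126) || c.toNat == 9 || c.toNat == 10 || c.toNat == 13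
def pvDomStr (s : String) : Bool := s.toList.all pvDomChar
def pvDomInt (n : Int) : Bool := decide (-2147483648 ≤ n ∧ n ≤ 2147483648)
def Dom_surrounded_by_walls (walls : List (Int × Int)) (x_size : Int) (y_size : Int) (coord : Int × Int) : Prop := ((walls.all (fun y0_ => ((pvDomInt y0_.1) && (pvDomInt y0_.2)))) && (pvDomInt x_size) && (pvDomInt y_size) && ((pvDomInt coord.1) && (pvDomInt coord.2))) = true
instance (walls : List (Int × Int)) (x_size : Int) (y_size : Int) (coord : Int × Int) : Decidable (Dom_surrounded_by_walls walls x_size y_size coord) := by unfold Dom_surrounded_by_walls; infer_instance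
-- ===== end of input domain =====

-- B replaces A's four directional grid scans by a single pass over the walls list
-- maintaining four direction flags (alternative decomposition, O(|walls|) per call).

-- ===== PORT A =====
-- each 'for … in range(…): if (…,…) in walls: flag = True; break' loop is List.any over the range
def surrounded_by_walls (walls : List (Int × Int)) (x_size : Int) (y_size : Int) (coord : Int × Int) : Bool :=
  let x := coord.1
  let y := coord.2
  let left := (PySem.List.pyRange (x - 1) (-1) (-1)).any (fun x1 => walls.contains (x1, y))
  let right := (PySem.List.pyRange (x + 1) x_size 1).any (fun x1 => walls.contains (x1, y))
  let top := (PySem.List.pyRange (y - 1) (-1) (-1)).any (fun y1 => walls.contains (x, y1))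
  let bottom := (PySem.List.pyRange (y + 1) y_size 1).any (fun y1 => walls.contains (x, y1))
  if left == false || right == false || top == false || bottom == false then false else true

-- ===== PORT B =====
-- one fold over the walls list; state = (left, right, top, bottom)
def surrounded_by_walls_alt (walls : List (Int × Int)) (x_size : Int) (y_size : Int) (coord : Int × Int) : Bool :=
  let x := coord.1
  let y := coord.2
  let s := walls.foldl
    (fun (s : Bool × Bool × Bool × Bool) w =>
      let l := if w.2 == y && decide (0 ≤ w.1) && decide (w.1 ≤ x - 1) then true else s.1
      let r := if w.2 == y && decide (x + 1 ≤ w.1) && decide (w.1 ≤ x_size - 1) then true else s.2.1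
      let t := if w.1 == x && decide (0 ≤ w.2) && decide (w.2 ≤ y - 1) then true else s.2.2.1
      let b := if w.1 == x && decide (y + 1 ≤ w.2) && decide (w.2 ≤ y_size - 1) then true else s.2.2.2
      (l, r, t, b))
    (false, false, false, false)
  s.1 && s.2.1 && s.2.2.1 && s.2.2.2

-- ===== PRECONDITION & SPEC =====
def Spec_surrounded_by_walls (walls : List (Int × Int)) (x_size : Int) (y_size : Int) (coord : Int × Int) (out : Bool) : Prop := out = surrounded_by_walls_alt walls x_size y_size coord
instance (walls : List (Int × Int)) (x_size : Int) (y_size : Int) (coord : Int × Int) (out : Bool) : Decidable (Spec_surrounded_by_walls walls x_size y_size coord out) := by unfold Spec_surrounded_by_walls; infer_instance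

-- ===== CLAIM (what is proved, stated in full; the proofs are below) =====
def Claim_equal_surrounded_by_walls : Prop := ∀ (walls : List (Int × Int)) (x_size : Int) (y_size : Int) (coord : Int × Int), Dom_surrounded_by_walls walls x_size y_size coord → Spec_surrounded_by_walls walls x_size y_size coord (surrounded_by_walls walls x_size y_size coord)

-- ===== LEMMAS AND PROOFS =====

-- B's fold: each component of the final state is the initial flag OR'd with an 'any' over walls
theorem foldB_eq (walls : List (Int × Int)) (pL pR pT pB : Int × Int → Bool)
    (l r t b : Bool) :
    walls.foldl
      (fun (s : Bool × Bool × Bool × Bool) w =>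
        (if pL w then true else s.1,
         if pR w then true else s.2.1,
         if pT w then true else s.2.2.1,
         if pB w then true else s.2.2.2))
      (l, r, t, b)
    = (l || walls.any pL, r || walls.any pR, t || walls.any pT, b || walls.any pB) := by
  induction walls generalizing l r t b with
  | nil => simp
  | cons w ws ih =>
    simp only [List.foldl_cons, List.any_cons, ih]
    cases hL : pL w <;> cases hR : pR w <;> cases hT : pT w <;> cases hB : pB w <;> simp

-- A's countdown scan along a row equals a single filter-test over walls
theorem scanNegRow (walls : List (Int × Int)) (x y : Int) :
    (PySem.List.pyRange (x - 1) (-1) (-1)).any (fun x1 => walls.contains (x1, y))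
    = walls.any (fun w => w.2 == y && decide (0 ≤ w.1) && decide (w.1 ≤ x - 1)) := by
  rw [Bool.eq_iff_iff]
  simp only [List.any_eq_true, PySem.List.mem_pyRange_neg_one, List.contains_iff_mem,
    Bool.and_eq_true, beq_iff_eq, decide_eq_true_eq]
  constructor
  · rintro ⟨x1, ⟨h1, h2⟩, hm⟩
    exact ⟨(x1, y), hm, ⟨rfl, by omega⟩, by omega⟩
  · rintro ⟨⟨wx, wy⟩, hm, ⟨he, h0⟩, h1⟩
    exact ⟨wx, ⟨by omega, by omega⟩, by rw [← he]; exact hm⟩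

theorem scanPosRow (walls : List (Int × Int)) (x y bnd : Int) :
    (PySem.List.pyRange (x + 1) bnd 1).any (fun x1 => walls.contains (x1, y))
    = walls.any (fun w => w.2 == y && decide (x + 1 ≤ w.1) && decide (w.1 ≤ bnd - 1)) := by
  rw [Bool.eq_iff_iff]
  simp only [List.any_eq_true, PySem.List.mem_pyRange_one, List.contains_iff_mem,
    Bool.and_eq_true, beq_iff_eq, decide_eq_true_eq]
  constructor
  · rintro ⟨x1, ⟨h1, h2⟩, hm⟩
    exact ⟨(x1, y), hm, ⟨rfl, by omega⟩, by omega⟩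
  · rintro ⟨⟨wx, wy⟩, hm, ⟨he, h0⟩, h1⟩
    exact ⟨wx, ⟨by omega, by omega⟩, by rw [← he]; exact hm⟩

theorem scanNegCol (walls : List (Int × Int)) (x y : Int) :
    (PySem.List.pyRange (y - 1) (-1) (-1)).any (fun y1 => walls.contains (x, y1))
    = walls.any (fun w => w.1 == x && decide (0 ≤ w.2) && decide (w.2 ≤ y - 1)) := by
  rw [Bool.eq_iff_iff]
  simp only [List.any_eq_true, PySem.List.mem_pyRange_neg_one, List.contains_iff_mem,
    Bool.and_eq_true, beq_iff_eq, decide_eq_true_eq]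
  constructor
  · rintro ⟨y1, ⟨h1, h2⟩, hm⟩
    exact ⟨(x, y1), hm, ⟨rfl, by omega⟩, by omega⟩
  · rintro ⟨⟨wx, wy⟩, hm, ⟨he, h0⟩, h1⟩
    exact ⟨wy, ⟨by omega, by omega⟩, by rw [← he]; exact hm⟩

theorem scanPosCol (walls : List (Int × Int)) (x y bnd : Int) :
    (PySem.List.pyRange (y + 1) bnd 1).any (fun y1 => walls.contains (x, y1))
    = walls.any (fun w => w.1 == x && decide (y + 1 ≤ w.2) && decide (w.2 ≤ bnd - 1)) := by
  rw [Bool.eq_iff_iff]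
  simp only [List.any_eq_true, PySem.List.mem_pyRange_one, List.contains_iff_mem,
    Bool.and_eq_true, beq_iff_eq, decide_eq_true_eq]
  constructor
  · rintro ⟨y1, ⟨h1, h2⟩, hm⟩
    exact ⟨(x, y1), hm, ⟨rfl, by omega⟩, by omega⟩
  · rintro ⟨⟨wx, wy⟩, hm, ⟨he, h0⟩, h1⟩
    exact ⟨wy, ⟨by omega, by omega⟩, by rw [← he]; exact hm⟩

-- ===== VERDICT (by name: the statement is the Claim_ definition above) =====
theorem surrounded_by_walls_spec : Claim_equal_surrounded_by_walls := by
  intro walls x_size y_size coord _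
  unfold Spec_surrounded_by_walls surrounded_by_walls surrounded_by_walls_alt
  obtain ⟨x, y⟩ := coord
  simp only
  rw [foldB_eq, scanNegRow, scanPosRow, scanNegCol, scanPosCol]
  cases walls.any (fun w => w.2 == y && decide (0 ≤ w.1) && decide (w.1 ≤ x - 1)) <;>
  cases walls.any (fun w => w.2 == y && decide (x + 1 ≤ w.1) && decide (w.1 ≤ x_size - 1)) <;>
  cases walls.any (fun w => w.1 == x && decide (0 ≤ w.2) && decide (w.2 ≤ y - 1)) <;>
  cases walls.any (fun w => w.1 == x && decide (y + 1 ≤ w.2) && decide (w.2 ≤ y_size - 1)) <;>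
  simp
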